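-- pv_equiv track=rewrite | github.com/nls-forev/AI-Companion | backend/app/stt_stream.py | _collapse_repeats
-- ===== SOURCE A (Python) =====
-- def _collapse_repeats(text: str) -> str:
--     # Collapse very long repeated short words: "so so so ..." -> up to 3 repeats
--     words = text.split()
--     out = []
--     repeat_count = 0
--     last_word = None
--     for w in words:
--         lw = w.lower()
--         if lw == last_word and len(lw) <= 3:
--             repeat_count += 1
--             if repeat_count <= 2:
--                 out.append(w)
--         else:
--             repeat_count = 0
--             out.append(w)
--         last_word = lw
--     return " ".join(out)
-- ===== SOURCE B (Python) =====
-- def _collapse_repeats(text: str) -> str: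
--     # Group consecutive words with equal lowercase form into runs, then
--     # truncate each short-word run (key length <= 3) to its first 3 words.
--     runs = []
--     cur_key = None
--     cur_group = []
--     for w in text.split():
--         k = w.lower()
--         if k == cur_key:
--             cur_group.append(w)
--         else:
--             if cur_group:
--                 runs.append((cur_key, cur_group))
--             cur_key, cur_group = k, [w]
--     if cur_group:
--         runs.append((cur_key, cur_group))
--     kept = []
--     for key, group in runs:
--         kept.extend(group if len(key) > 3 else group[:3])
--     return " ".join(kept)
-- ===== Notes on version B (the rewrite author's own statement) =====
-- stated objective: alternative
-- what changed: Replaces A's streaming repeat_count/last_word state machine with a group-then-truncate pass: first group consecutive words with equal lowercase form into runs, then keep each run whole (key longer than 3) or its first 3 words (key of length <= 3) and join.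
import Mathlib
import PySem

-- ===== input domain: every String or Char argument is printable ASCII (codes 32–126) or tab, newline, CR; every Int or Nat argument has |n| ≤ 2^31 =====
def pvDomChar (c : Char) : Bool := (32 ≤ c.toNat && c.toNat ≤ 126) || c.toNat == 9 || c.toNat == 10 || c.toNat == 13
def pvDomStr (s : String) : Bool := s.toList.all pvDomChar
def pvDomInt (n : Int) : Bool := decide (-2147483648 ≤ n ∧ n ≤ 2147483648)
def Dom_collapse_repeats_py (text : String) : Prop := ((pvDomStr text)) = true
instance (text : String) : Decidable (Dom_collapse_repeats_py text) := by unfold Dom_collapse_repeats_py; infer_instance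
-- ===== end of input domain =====

-- B replaces A's streaming repeat_count/last_word state machine by a group-then-truncate
-- pass (group consecutive equal-lowercase words into runs, keep short-key runs up to 3
-- words, join); same cost, alternative decomposition.

-- ===== PORT A =====
-- loop state: (out, repeat_count, last_word)
def stepA (s : List String × Int × Option String) (w : String) : List String × Int × Option String :=
  let lw := PySem.Str.lower w
  if some lw = s.2.2 ∧ PySem.Str.len lw ≤ 3 then
    let rc := s.2.1 + 1
    ((if rc ≤ 2 then s.1 ++ [w] else s.1), rc, some lw)
  else
    (s.1 ++ [w], 0, some lw)

def collapse_repeats_py (text : String) : String :=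
  let words := PySem.Str.split₀ text
  PySem.Str.join " " (words.foldl stepA ([], 0, none)).1

-- ===== PORT B =====
-- loop state: (runs, cur_key, cur_group); a flush appends (cur_key, cur_group) when nonempty
def stepB (s : List (String × List String) × Option String × List String) (w : String) :
    List (String × List String) × Option String × List String :=
  let k := PySem.Str.lower w
  if some k = s.2.1 then (s.1, s.2.1, s.2.2 ++ [w])
  else ((if s.2.2.isEmpty then s.1 else s.1 ++ [(s.2.1.getD "", s.2.2)]), some k, [w])

-- keep a whole run, or its first 3 words when the key is short (group[:3])
def keepRunB (k : String) (g : List String) : List String :=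
  if PySem.Str.len k > 3 then g else PySem.List.slice g none (some 3)

def collapse_repeats_py_alt (text : String) : String :=
  let st := (PySem.Str.split₀ text).foldl stepB ([], none, [])
  let runs := if st.2.2.isEmpty then st.1 else st.1 ++ [(st.2.1.getD "", st.2.2)]
  let kept := runs.foldl (fun acc kg => acc ++ keepRunB kg.1 kg.2) ([] : List String)
  PySem.Str.join " " kept

-- ===== PRECONDITION & SPEC =====
def Spec_collapse_repeats_py (text : String) (out : String) : Prop := out = collapse_repeats_py_alt text
instance (text : String) (out : String) : Decidable (Spec_collapse_repeats_py text out) := by unfold Spec_collapse_repeats_py; infer_instance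

-- ===== CLAIM (what is proved, stated in full; the proofs are below) =====
def Claim_equal_collapse_repeats_py : Prop := ∀ (text : String), Dom_collapse_repeats_py text → Spec_collapse_repeats_py text (collapse_repeats_py text)

-- ===== LEMMAS AND PROOFS =====

-- A's remaining output from loop state (repeat_count, last_word), over an empty out
def aRest (rc : Int) (last : Option String) (ws : List String) : List String :=
  (ws.foldl stepA ([], rc, last)).1

-- B's runs from loop state (cur_key, cur_group), over an empty runs list, finalized
def bRuns (ck : Option String) (cg : List String) (ws : List String) : List (String × List String) :=
  let st := ws.foldl stepB ([], ck, cg)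
  st.1 ++ (if st.2.2.isEmpty then [] else [(st.2.1.getD "", st.2.2)])

def bRest (ck : Option String) (cg : List String) (ws : List String) : List String :=
  (bRuns ck cg ws).flatMap (fun kg => keepRunB kg.1 kg.2)

-- the repeat_count A carries while B's current run is (k, g)
def rcOf (k : String) (g : List String) : Int :=
  if PySem.Str.len k ≤ 3 then (g.length : Int) - 1 else 0

lemma stepA_decomp (s : List String × Int × Option String) (w : String) :
    stepA s w = (s.1 ++ (stepA ([], s.2) w).1, (stepA ([], s.2) w).2) := by
  simp only [stepA]; split_ifs <;> simp

lemma foldA_out (ws : List String) : ∀ (st : List String × Int × Option String),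
    (ws.foldl stepA st).1 = st.1 ++ (ws.foldl stepA ([], st.2)).1 := by
  induction ws with
  | nil => intro st; simp
  | cons w ws ih =>
    intro st
    show (ws.foldl stepA (stepA st w)).1 = st.1 ++ (ws.foldl stepA (stepA ([], st.2) w)).1
    rw [ih (stepA st w), ih (stepA ([], st.2) w), stepA_decomp st w]
    simp [List.append_assoc]

lemma aRest_cons (rc : Int) (last : Option String) (w : String) (ws : List String) :
    aRest rc last (w :: ws) =
      (stepA ([], rc, last) w).1 ++
        aRest (stepA ([], rc, last) w).2.1 (stepA ([], rc, last) w).2.2 ws := by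
  show (ws.foldl stepA (stepA ([], rc, last) w)).1 = _
  rw [foldA_out]
  rfl

lemma stepB_decomp (s : List (String × List String) × Option String × List String) (w : String) :
    stepB s w = (s.1 ++ (stepB ([], s.2) w).1, (stepB ([], s.2) w).2) := by
  simp only [stepB]; split_ifs <;> simp

lemma foldB_out (ws : List String) : ∀ (st : List (String × List String) × Option String × List String),
    (ws.foldl stepB st).1 = st.1 ++ (ws.foldl stepB ([], st.2)).1 := by
  induction ws with
  | nil => intro st; simp
  | cons w ws ih =>
    intro st
    show (ws.foldl stepB (stepB st w)).1 = st.1 ++ (ws.foldl stepB (stepB ([], st.2) w)).1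
    rw [ih (stepB st w), ih (stepB ([], st.2) w), stepB_decomp st w]
    simp [List.append_assoc]

lemma foldB_snd (ws : List String) : ∀ (st : List (String × List String) × Option String × List String),
    (ws.foldl stepB st).2 = (ws.foldl stepB ([], st.2)).2 := by
  induction ws with
  | nil => intro st; rfl
  | cons w ws ih =>
    intro st
    show (ws.foldl stepB (stepB st w)).2 = (ws.foldl stepB (stepB ([], st.2) w)).2
    rw [ih (stepB st w), ih (stepB ([], st.2) w), stepB_decomp st w]

lemma bRest_cons_same (k : String) (g : List String) (w : String) (ws : List String)
    (h : PySem.Str.lower w = k) :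
    bRest (some k) g (w :: ws) = bRest (some k) (g ++ [w]) ws := by
  unfold bRest bRuns
  simp [stepB, h]

lemma bRest_cons_flush (k : String) (g : List String) (w : String) (ws : List String)
    (hg : g ≠ []) (h : PySem.Str.lower w ≠ k) :
    bRest (some k) g (w :: ws) = keepRunB k g ++ bRest (some (PySem.Str.lower w)) [w] ws := by
  have hne : ¬ some (PySem.Str.lower w) = some k := by simpa using h
  have hgE : g.isEmpty = false := by simpa [List.isEmpty_iff] using hg
  unfold bRest bRuns
  simp only [List.foldl_cons, stepB, hne, hgE]
  rw [foldB_out, foldB_snd]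
  simp

lemma keepRunB_take (k : String) (g : List String) (w : String) (hlen : PySem.Str.len k ≤ 3) :
    keepRunB k (g ++ [w]) = keepRunB k g ++ (if (g.length : Int) ≤ 2 then [w] else []) := by
  have h3 : ¬ PySem.Str.len k > 3 := by omega
  simp only [keepRunB, if_neg h3]
  rw [(by simp [pysem] : PySem.List.slice (g ++ [w]) none (some 3) = (g ++ [w]).take 3),
      (by simp [pysem] : PySem.List.slice g none (some 3) = g.take 3)]
  by_cases hg : g.length ≤ 2
  · rw [if_pos (by exact_mod_cast hg)]
    rw [List.take_of_length_le (by simp; omega), List.take_of_length_le (by omega)]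
  · rw [if_neg (by omega)]
    rw [List.take_append_of_le_length (by omega), List.append_nil]

lemma keepRunB_long (k : String) (g : List String) (hlen : ¬ PySem.Str.len k ≤ 3) :
    keepRunB k g = g := by
  simp only [keepRunB]
  rw [if_pos (by omega : PySem.Str.len k > 3)]

lemma keepRunB_single (k : String) (w : String) : keepRunB k [w] = [w] := by
  by_cases h : PySem.Str.len k > 3
  · simp only [keepRunB]; rw [if_pos h]
  · simp only [keepRunB]
    rw [if_neg h, (by simp [pysem] : PySem.List.slice [w] none (some 3) = [w].take 3)]
    simp

lemma rcOf_single (k : String) (w : String) : rcOf k [w] = 0 := by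
  unfold rcOf; split_ifs <;> simp

lemma crux (ws : List String) : ∀ (k : String) (g : List String), g ≠ [] →
    keepRunB k g ++ aRest (rcOf k g) (some k) ws = bRest (some k) g ws := by
  induction ws with
  | nil =>
    intro k g hg
    have hgE : g.isEmpty = false := by simpa [List.isEmpty_iff] using hg
    simp [aRest, bRest, bRuns, hgE]
  | cons w ws ih =>
    intro k g hg
    have hg1 : 1 ≤ g.length := List.length_pos_iff.mpr hg
    by_cases hk : PySem.Str.lower w = k
    · by_cases hlen : PySem.Str.len k ≤ 3
      · -- short key, same word: run extends, A keeps w iff it is at most the 3rd of its run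
        have hc : some (PySem.Str.lower w) = some k ∧ PySem.Str.len (PySem.Str.lower w) ≤ 3 := by
          rw [hk]; exact ⟨rfl, hlen⟩
        have hrc1 : rcOf k g + 1 = (g.length : Int) := by
          unfold rcOf; rw [if_pos hlen]; omega
        have hw : stepA ([], rcOf k g, some k) w =
            ((if (g.length : Int) ≤ 2 then [w] else []), (g.length : Int), some k) := by
          simp only [stepA, hk]
          rw [if_pos (⟨trivial, hlen⟩ : True ∧ PySem.Str.len k ≤ 3), hrc1]
          split_ifs <;> simp
        have hrc2 : rcOf k (g ++ [w]) = (g.length : Int) := by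
          unfold rcOf
          rw [if_pos hlen]
          simp only [List.length_append, List.length_cons, List.length_nil]
          push_cast
          omega
        rw [aRest_cons, hw, bRest_cons_same k g w ws hk,
            ← ih k (g ++ [w]) (by simp), hrc2, keepRunB_take k g w hlen]
        simp only [List.append_assoc]
      · -- long key, same word: A resets and keeps w; B extends the run (all kept)
        have hc : ¬ (some (PySem.Str.lower w) = some k ∧ PySem.Str.len (PySem.Str.lower w) ≤ 3) := by
          rw [hk]; exact fun h => hlen h.2
        have hw : stepA ([], rcOf k g, some k) w = ([w], 0, some k) := by
          simp only [stepA, hk]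
          rw [if_neg (fun h => hlen h.2)]
          simp
        have hrc2 : rcOf k (g ++ [w]) = 0 := by unfold rcOf; rw [if_neg hlen]
        have hrc0 : rcOf k g = 0 := by unfold rcOf; rw [if_neg hlen]
        rw [aRest_cons, hw, bRest_cons_same k g w ws hk,
            ← ih k (g ++ [w]) (by simp), hrc2,
            keepRunB_long k g hlen, keepRunB_long k (g ++ [w]) hlen]
        simp
    · -- different word: A resets and keeps w; B flushes (k, g) and starts the run [w]
      have hc : ¬ (some (PySem.Str.lower w) = some k ∧ PySem.Str.len (PySem.Str.lower w) ≤ 3) := by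
        intro h; exact hk (by simpa using h.1)
      have hw : stepA ([], rcOf k g, some k) w = ([w], 0, some (PySem.Str.lower w)) := by
        simp only [stepA]
        rw [if_neg hc]
        simp
      rw [aRest_cons, hw, bRest_cons_flush k g w ws hg hk,
          ← ih (PySem.Str.lower w) [w] (by simp), keepRunB_single, rcOf_single]

lemma alt_eq_bRest (text : String) :
    collapse_repeats_py_alt text = PySem.Str.join " " (bRest none [] (PySem.Str.split₀ text)) := by
  unfold collapse_repeats_py_alt bRest bRuns
  simp only []
  congr 1
  have h := PySem.List.foldl_append_eq_flatMap
    (g := fun kg : String × List String => keepRunB kg.1 kg.2)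
    (l := let st := (PySem.Str.split₀ text).foldl stepB ([], none, [])
          if st.2.2.isEmpty then st.1 else st.1 ++ [(st.2.1.getD "", st.2.2)])
    (acc := [])
  simp only [List.nil_append] at h
  rw [h]
  congr 1
  split_ifs <;> simp

-- ===== VERDICT (by name: the statement is the Claim_ definition above) =====
theorem collapse_repeats_py_spec : Claim_equal_collapse_repeats_py := by
  intro text _
  unfold Spec_collapse_repeats_py
  rw [alt_eq_bRest]
  unfold collapse_repeats_py
  simp only []
  congr 1
  cases hws : PySem.Str.split₀ text with
  | nil => rfl
  | cons w ws =>
    have h0 : stepA ([], (0 : Int), (none : Option String)) w = ([w], 0, some (PySem.Str.lower w)) := by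
      simp [stepA]
    have h0B : bRest none [] (w :: ws) = bRest (some (PySem.Str.lower w)) [w] ws := by
      unfold bRest bRuns
      simp [stepB]
    simp only [List.foldl_cons, h0, h0B]
    rw [foldA_out]
    have h := crux ws (PySem.Str.lower w) [w] (by simp)
    rw [keepRunB_single, rcOf_single] at h
    simpa [aRest] using h
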